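-- pv_equiv track=rewrite | github.com/eyoul/CBE-YTWL-TR | gt06.py | bytes_to_imei
-- ===== SOURCE A (Python) =====
-- def bytes_to_imei(data):
--     imei_bytes = data[4:12]
--     imei = ""
--     for b in imei_bytes:
--         high = b >> 4
--         low = b & 0x0F
--         if high <= 9:
--             imei += str(high)
--         if low <= 9:
--             imei += str(low)
--     return imei
-- ===== SOURCE B (Python) =====
-- def bytes_to_imei(data):
--     n = min(len(data), 12) - 4          # number of bytes in the IMEI window
--     def nib(i):                          # i-th nibble of the window, high nibble first
--         b = data[4 + (i >> 1)]
--         return b >> 4 if i & 1 == 0 else b & 0x0F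
--     def build(i, acc):                   # assemble back-to-front from nibble position i
--         if i < 0:
--             return acc
--         v = nib(i)
--         return build(i - 1, str(v) + acc if v <= 9 else acc)
--     return build(2 * n - 1, "")
-- ===== Notes on version B (the rewrite author's own statement) =====
-- stated objective: alternative
-- what changed: Replaces A's forward per-byte loop (shift/mask each byte, two sequential ifs appending to a growing string) by a tail recursion over the 16 nibble POSITIONS counting down from the last, selecting high/low by index parity and assembling the result back-to-front by prepending.
import Mathlib
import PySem

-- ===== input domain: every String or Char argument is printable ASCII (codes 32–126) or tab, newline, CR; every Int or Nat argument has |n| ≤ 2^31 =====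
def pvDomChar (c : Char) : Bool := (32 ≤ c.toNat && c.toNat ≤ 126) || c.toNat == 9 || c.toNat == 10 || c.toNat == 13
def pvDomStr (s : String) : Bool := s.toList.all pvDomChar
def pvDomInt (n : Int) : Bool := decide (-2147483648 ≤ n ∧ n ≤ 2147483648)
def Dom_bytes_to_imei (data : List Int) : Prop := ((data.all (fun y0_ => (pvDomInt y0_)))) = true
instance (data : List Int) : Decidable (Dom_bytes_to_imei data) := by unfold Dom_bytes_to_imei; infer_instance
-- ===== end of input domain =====

-- B replaces A's forward per-byte loop by a tail recursion over the nibble POSITIONS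
-- of the IMEI window, counting down and assembling the string back-to-front
-- (objective: alternative; same cost).

-- ===== PORT A =====
-- A accumulates a string; the port accumulates its character list (String.ofList at the
-- end), since Python's += on str is exactly append of the character lists.
def bytes_to_imei (data : List Int) : String :=
  String.ofList ((PySem.List.slice data (some 4) (some 12)).foldl
    (fun imei (b : Int) =>
      let high := b >>> (4 : Nat)          -- Python b >> 4 (floors, also on negatives)
      let low := PySem.Int.band b 15       -- Python b & 0x0F
      let imei := if high ≤ 9 then imei ++ PySem.Int.toChars high else imei
      if low ≤ 9 then imei ++ PySem.Int.toChars low else imei) [])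

-- ===== PORT B =====
-- nib(i) of Source B: data[4 + (i >> 1)].  Inside build's calls the index is always in
-- range, so the `.getD 0` default is never used (Python would raise out of range).
def pvNib (data : List Int) (i : Nat) : Int :=
  let b := (PySem.List.pyGet? data ((4 : Int) + ((i >>> 1 : Nat) : Int))).getD 0
  if i &&& 1 == 0 then b >>> (4 : Nat) else PySem.Int.band b 15

-- build(i, acc) of Source B; Python counts i down to -1, the port's Nat argument is i+1
-- (0 is Python's i < 0 base case).
def pvBuild (data : List Int) : Nat → List Char → List Char
  | 0, acc => acc
  | j + 1, acc =>
      let v := pvNib data j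
      pvBuild data j (if v ≤ 9 then PySem.Int.toChars v ++ acc else acc)

-- start index is 2*n - 1, so the port's counter is 2*n; `.toNat` clamps the
-- negative-n case exactly as Python's `if i < 0` base case does.
def bytes_to_imei_alt (data : List Int) : String :=
  String.ofList (pvBuild data (2 * (min (data.length : Int) 12 - 4)).toNat [])

-- ===== PRECONDITION & SPEC =====
def Spec_bytes_to_imei (data : List Int) (out : String) : Prop := out = bytes_to_imei_alt data
instance (data : List Int) (out : String) : Decidable (Spec_bytes_to_imei data out) := by unfold Spec_bytes_to_imei; infer_instance

-- ===== CLAIM (what is proved, stated in full; the proofs are below) =====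
def Claim_equal_bytes_to_imei : Prop := ∀ (data : List Int), Dom_bytes_to_imei data → Spec_bytes_to_imei data (bytes_to_imei data)

-- ===== LEMMAS AND PROOFS =====

-- the two-character contribution of one byte, as A produces it
def pvCB (b : Int) : List Char :=
  (if b >>> (4 : Nat) ≤ 9 then PySem.Int.toChars (b >>> (4 : Nat)) else []) ++
  (if PySem.Int.band b 15 ≤ 9 then PySem.Int.toChars (PySem.Int.band b 15) else [])

-- the contribution of one nibble position, as B produces it
def pvCP (data : List Int) (j : Nat) : List Char :=
  if pvNib data j ≤ 9 then PySem.Int.toChars (pvNib data j) else []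

-- A's fold appends the per-byte contributions.
theorem pvLoopA (l : List Int) (acc : List Char) :
    l.foldl
      (fun imei (b : Int) =>
        let high := b >>> (4 : Nat)
        let low := PySem.Int.band b 15
        let imei := if high ≤ 9 then imei ++ PySem.Int.toChars high else imei
        if low ≤ 9 then imei ++ PySem.Int.toChars low else imei) acc
    = acc ++ (l.map pvCB).flatten := by
  induction l generalizing acc with
  | nil => simp
  | cons b t ih =>
    rw [List.foldl_cons, ih]
    simp only [List.map_cons, List.flatten_cons, ← List.append_assoc]
    congr 1
    unfold pvCB
    by_cases h1 : b >>> (4 : Nat) ≤ 9 <;> by_cases h2 : PySem.Int.band b 15 ≤ 9 <;>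
      simp [h1, h2]

-- B's countdown prepends the per-position contributions.
theorem pvBuildSpec (data : List Int) (m : Nat) (acc : List Char) :
    pvBuild data m acc = ((List.range m).map (pvCP data)).flatten ++ acc := by
  induction m generalizing acc with
  | zero => simp [pvBuild]
  | succ j ih =>
    rw [pvBuild, ih, List.range_succ]
    unfold pvCP
    by_cases h : pvNib data j ≤ 9 <;> simp [h]

-- positions 0 .. 2L-1 grouped in (high, low) pairs
theorem pvRangePairs (L : Nat) :
    List.range (2 * L) = (List.range L).flatMap (fun k => [2 * k, 2 * k + 1]) := by
  induction L with
  | zero => simp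
  | succ L ih =>
    have : 2 * (L + 1) = (2 * L + 1) + 1 := by ring
    rw [this, List.range_succ, List.range_succ, List.range_succ, ih]
    simp [List.flatMap_append]

-- mapping a function of the indexed element over range(len) is mapping over the list
theorem pvMapRangeGetD {α β : Type} (l : List α) (d : α) (f : α → β) :
    (List.range l.length).map (fun k => f (l.getD k d)) = l.map f := by
  induction l with
  | nil => simp
  | cons a t ih =>
    rw [List.length_cons, List.range_succ_eq_map]
    simp only [List.map_cons, List.map_map, Function.comp_def, List.getD_cons_zero,
      List.getD_cons_succ]
    rw [ih]

-- evaluating B's nib inside the window: it reads exactly the slice's k-th byte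
theorem pvNibEval (data : List Int) (k : Nat)
    (hk : k < (PySem.List.slice data (some 4) (some 12)).length) :
    pvNib data (2 * k) = ((PySem.List.slice data (some 4) (some 12)).getD k 0) >>> (4 : Nat) ∧
    pvNib data (2 * k + 1) =
      PySem.Int.band ((PySem.List.slice data (some 4) (some 12)).getD k 0) 15 := by
  have hsl : PySem.List.slice data (some 4) (some 12) = (data.drop 4).take 8 := by
    have := PySem.List.slice_natCast (xs := data) (a := 4) (b := 12)
    simpa using this
  rw [hsl] at hk ⊢
  have hlen : ((data.drop 4).take 8).length = min 8 (data.length - 4) := by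
    simp [List.length_take, List.length_drop]
  have hidx : 4 + k < data.length := by omega
  have hget : ((data.drop 4).take 8).getD k 0 = data.getD (4 + k) 0 := by
    rw [List.getD_eq_getElem _ _ (by omega), List.getD_eq_getElem _ _ (by omega)]
    rw [List.getElem_take, List.getElem_drop]
  have hpg : (PySem.List.pyGet? data ((4 : Int) + (k : Int))).getD 0 = data.getD (4 + k) 0 := by
    have h4k : ((4 : Int) + (k : Int)) = ((4 + k : Nat) : Int) := by push_cast; ring
    rw [h4k, PySem.List.pyGet?_natCast]
    rw [List.getD_eq_getElem _ _ (by omega)]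
    simp [List.getElem?_eq_getElem hidx]
  constructor
  · unfold pvNib
    have h1 : (2 * k) >>> 1 = k := by
      simp [Nat.shiftRight_eq_div_pow]
    have h2 : ((2 * k) &&& 1 == 0) = true := by
      simp [Nat.and_one_is_mod]
    rw [h1, h2, hpg, hget]
    simp
  · unfold pvNib
    have h1 : (2 * k + 1) >>> 1 = k := by
      simp [Nat.shiftRight_eq_div_pow]
      omega
    have h2 : ((2 * k + 1) &&& 1 == 0) = false := by
      simp [Nat.and_one_is_mod]
    rw [h1, h2, hpg, hget]
    simp

-- the window length: B's 2*n counter is twice the slice's length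
theorem pvCounter (data : List Int) :
    (2 * (min (data.length : Int) 12 - 4)).toNat
      = 2 * (PySem.List.slice data (some 4) (some 12)).length := by
  have hsl : PySem.List.slice data (some 4) (some 12) = (data.drop 4).take 8 := by
    have := PySem.List.slice_natCast (xs := data) (a := 4) (b := 12)
    simpa using this
  rw [hsl]
  simp [List.length_take, List.length_drop]
  omega

-- ===== VERDICT (by name: the statement is the Claim_ definition above) =====
-- flatten commutes with flatMap
theorem pvFlattenFlatMap {α β : Type} (l : List α) (f : α → List (List β)) :
    (l.flatMap f).flatten = l.flatMap (fun x => (f x).flatten) := by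
  induction l with
  | nil => simp
  | cons a t ih => simp [ih]

theorem bytes_to_imei_spec : Claim_equal_bytes_to_imei := by
  intro data _
  unfold Spec_bytes_to_imei bytes_to_imei bytes_to_imei_alt
  rw [pvLoopA, List.nil_append, pvCounter, pvBuildSpec, List.append_nil]
  congr 1
  set l := PySem.List.slice data (some 4) (some 12) with hl
  rw [pvRangePairs, List.map_flatMap, pvFlattenFlatMap]
  have hcong : (List.range l.length).flatMap
        (fun k => (List.map (pvCP data) [2 * k, 2 * k + 1]).flatten)
      = (List.range l.length).flatMap (fun k => pvCB (l.getD k 0)) := by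
    rw [List.flatMap_def, List.flatMap_def]
    congr 1
    apply List.map_congr_left
    intro k hk
    have hk' : k < l.length := List.mem_range.mp hk
    obtain ⟨h1, h2⟩ := pvNibEval data k hk'
    rw [← hl] at h1 h2
    simp only [List.map_cons, List.map_nil, List.flatten, pvCP, pvCB, h1, h2]
    simp
  rw [hcong, List.flatMap_def, pvMapRangeGetD l 0 pvCB, ← List.flatMap_def,
    List.flatMap_def]
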